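-- pv_equiv track=rewrite | github.com/TGALLOWAY1/ReinforcementLearning_Blokus | browser_python/engine/advanced_metrics.py | compute_piece_penalty
-- ===== SOURCE A (Python) =====
-- from typing import Dict, List, Set, Tuple
--
-- def compute_piece_penalty(pieces_used: Set[int]) -> int:
--     penalty = 0
--     for pid in range(1, 22):
--         if pid not in pieces_used:
--             if pid in [17, 19, 20]:
--                 penalty += 5
--             elif pid >= 11:
--                 penalty += 2
--             elif pid >= 5 and pid <= 10:
--                 penalty += 1
--     return penalty
-- ===== SOURCE B (Python) =====
-- # Penalty table + inverted pass: total-when-nothing-used minus penalties of used pieces.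
-- PIECE_PENALTY = {5: 1, 6: 1, 7: 1, 8: 1, 9: 1, 10: 1,
--                  11: 2, 12: 2, 13: 2, 14: 2, 15: 2, 16: 2,
--                  17: 5, 18: 2, 19: 5, 20: 5, 21: 2}
-- TOTAL_PENALTY = 37  # sum of all table penalties
--
-- def compute_piece_penalty(pieces_used):
--     return TOTAL_PENALTY - sum(p for pid, p in PIECE_PENALTY.items() if pid in pieces_used)
-- ===== Notes on version B (the rewrite author's own statement) =====
-- stated objective: simpler
-- what changed: Replaced the range(1,22) scan with its if/elif penalty ladder by a precomputed penalty table: B returns the fixed total 37 minus the penalties of the table ids found in pieces_used.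
import Mathlib
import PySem

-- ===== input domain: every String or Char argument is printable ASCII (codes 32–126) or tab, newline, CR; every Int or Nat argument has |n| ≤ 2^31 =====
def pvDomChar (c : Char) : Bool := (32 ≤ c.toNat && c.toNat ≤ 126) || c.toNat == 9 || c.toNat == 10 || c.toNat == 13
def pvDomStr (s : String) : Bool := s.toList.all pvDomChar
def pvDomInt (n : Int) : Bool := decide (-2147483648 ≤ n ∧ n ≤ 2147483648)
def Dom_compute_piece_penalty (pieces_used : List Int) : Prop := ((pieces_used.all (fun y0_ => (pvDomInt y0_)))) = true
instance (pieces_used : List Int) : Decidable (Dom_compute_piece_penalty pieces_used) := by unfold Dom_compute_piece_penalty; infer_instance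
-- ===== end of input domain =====

-- B replaces A's range(1,22) scan with its if/elif penalty ladder by a precomputed penalty
-- table, returning the fixed total 37 minus the penalties of the used ids (objective: simpler).

-- ===== PORT A =====
def compute_piece_penalty (pieces_used : List Int) : Int :=
  (PySem.List.pyRange 1 22 1).foldl (fun penalty pid =>
    if ¬ pieces_used.contains pid then
      if ([17, 19, 20] : List Int).contains pid then penalty + 5
      else if pid ≥ 11 then penalty + 2
      else if pid ≥ 5 ∧ pid ≤ 10 then penalty + 1
      else penalty
    else penalty) 0

-- ===== PORT B =====
def piecePenaltyTable : List (Int × Int) :=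
  [(5, 1), (6, 1), (7, 1), (8, 1), (9, 1), (10, 1),
   (11, 2), (12, 2), (13, 2), (14, 2), (15, 2), (16, 2),
   (17, 5), (18, 2), (19, 5), (20, 5), (21, 2)]

def compute_piece_penalty_alt (pieces_used : List Int) : Int :=
  37 - piecePenaltyTable.foldl
    (fun s kv => if pieces_used.contains kv.1 then s + kv.2 else s) 0

-- ===== PRECONDITION & SPEC =====
def Spec_compute_piece_penalty (pieces_used : List Int) (out : Int) : Prop := out = compute_piece_penalty_alt pieces_used
instance (pieces_used : List Int) (out : Int) : Decidable (Spec_compute_piece_penalty pieces_used out) := by unfold Spec_compute_piece_penalty; infer_instance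

-- ===== CLAIM (what is proved, stated in full; the proofs are below) =====
def Claim_equal_compute_piece_penalty : Prop := ∀ (pieces_used : List Int), Dom_compute_piece_penalty pieces_used → Spec_compute_piece_penalty pieces_used (compute_piece_penalty pieces_used)

-- ===== LEMMAS AND PROOFS =====

-- per-id contribution of A's loop body (as a value added to the accumulator)
def gA (l : List Int) (pid : Int) : Int :=
  if ¬ l.contains pid then
    (if ([17, 19, 20] : List Int).contains pid then 5
     else if pid ≥ 11 then 2
     else if pid ≥ 5 ∧ pid ≤ 10 then 1
     else 0)
  else 0

-- per-entry contribution of B's table loop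
def gB (l : List Int) (kv : Int × Int) : Int := if l.contains kv.1 then kv.2 else 0

theorem stepA (l : List Int) (acc pid : Int) :
    (if ¬ l.contains pid then
      if ([17, 19, 20] : List Int).contains pid then acc + 5
      else if pid ≥ 11 then acc + 2
      else if pid ≥ 5 ∧ pid ≤ 10 then acc + 1
      else acc
    else acc) = acc + gA l pid := by
  unfold gA; split_ifs <;> omega

theorem stepB (l : List Int) (acc : Int) (kv : Int × Int) :
    (if l.contains kv.1 then acc + kv.2 else acc) = acc + gB l kv := by
  unfold gB; split_ifs <;> omega

theorem ite_compl (c : Prop) [Decidable c] (p : Int) :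
    (if c then 0 else p) = p - (if c then p else 0) := by split <;> ring

-- ===== VERDICT (by name: the statement is the Claim_ definition above) =====
theorem compute_piece_penalty_spec : Claim_equal_compute_piece_penalty := by
  intro l _
  unfold Spec_compute_piece_penalty compute_piece_penalty compute_piece_penalty_alt
  rw [show PySem.List.pyRange 1 22 1 =
      [1,2,3,4,5,6,7,8,9,10,11,12,13,14,15,16,17,18,19,20,21] from by decide]
  rw [show ([1,2,3,4,5,6,7,8,9,10,11,12,13,14,15,16,17,18,19,20,21] : List Int).foldl
        (fun penalty pid =>
          if ¬ l.contains pid then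
            if ([17, 19, 20] : List Int).contains pid then penalty + 5
            else if pid ≥ 11 then penalty + 2
            else if pid ≥ 5 ∧ pid ≤ 10 then penalty + 1
            else penalty
          else penalty) 0
      = ([1,2,3,4,5,6,7,8,9,10,11,12,13,14,15,16,17,18,19,20,21] : List Int).foldl
        (fun acc pid => acc + gA l pid) 0
      from PySem.List.foldl_congr_mem _ _ _ _ (fun acc x _ => stepA l acc x)]
  rw [show piecePenaltyTable.foldl
        (fun s kv => if l.contains kv.1 then s + kv.2 else s) 0
      = piecePenaltyTable.foldl (fun acc kv => acc + gB l kv) 0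
      from PySem.List.foldl_congr_mem _ _ _ _ (fun acc x _ => stepB l acc x)]
  rw [PySem.List.foldl_add, PySem.List.foldl_add]
  simp only [List.map_cons, List.map_nil, List.sum_cons, List.sum_nil, gA, gB, piecePenaltyTable]
  norm_num [ite_compl]
  generalize (if (5:Int) ∈ l then (1:Int) else 0) = t5
  generalize (if (6:Int) ∈ l then (1:Int) else 0) = t6
  generalize (if (7:Int) ∈ l then (1:Int) else 0) = t7
  generalize (if (8:Int) ∈ l then (1:Int) else 0) = t8
  generalize (if (9:Int) ∈ l then (1:Int) else 0) = t9
  generalize (if (10:Int) ∈ l then (1:Int) else 0) = t10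
  generalize (if (11:Int) ∈ l then (2:Int) else 0) = t11
  generalize (if (12:Int) ∈ l then (2:Int) else 0) = t12
  generalize (if (13:Int) ∈ l then (2:Int) else 0) = t13
  generalize (if (14:Int) ∈ l then (2:Int) else 0) = t14
  generalize (if (15:Int) ∈ l then (2:Int) else 0) = t15
  generalize (if (16:Int) ∈ l then (2:Int) else 0) = t16
  generalize (if (17:Int) ∈ l then (5:Int) else 0) = t17
  generalize (if (18:Int) ∈ l then (2:Int) else 0) = t18
  generalize (if (19:Int) ∈ l then (5:Int) else 0) = t19
  generalize (if (20:Int) ∈ l then (5:Int) else 0) = t20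
  generalize (if (21:Int) ∈ l then (2:Int) else 0) = t21
  omega
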